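-- pv_equiv track=rewrite | github.com/tsuru7/algorithm-study | AtCoder/ABC/201-300/ABC278/C.py | solve
-- ===== SOURCE A (Python) =====
-- def solve(n,queries):
--     graph = dict()
--     ans=[]
--     for t, a, b in queries:
--         if t == 1:
--             if a not in graph:
--                 graph[a] = {b}
--             else:
--                 graph[a].add(b)
--         elif t == 2:
--             if a in graph:
--                 graph[a].discard(b)
--         elif t == 3:
--             if a not in graph or b not in graph:
--                 ans.append('No')
--             else:
--                 if b in graph[a] and a in graph[b]:
--                     ans.append('Yes')
--                 else:
--                     ans.append('No')
--
--     return ans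
-- ===== SOURCE B (Python) =====
-- def _present(prefix, a, b):
--     # directed edge (a,b) exists after the events in prefix iff the most recent
--     # add/remove event touching (a,b) in prefix is an add
--     for t, x, y in reversed(prefix):
--         if x == a and y == b and (t == 1 or t == 2):
--             return t == 1
--     return False
--
-- def solve(n, queries):
--     ans = []
--     for i, (t, a, b) in enumerate(queries):
--         if t == 3:
--             prefix = queries[:i]
--             if _present(prefix, a, b) and _present(prefix, b, a):
--                 ans.append('Yes')
--             else:
--                 ans.append('No')
--     return ans
-- ===== Notes on version B (the rewrite author's own statement) =====
-- stated objective: alternative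
-- what changed: Replaces A's stateful single pass over a dict-of-sets by a stateless offline formulation: for each t=3 query it rescans the query prefix backwards and answers from the most recent add/remove event on each directed pair, so no adjacency structure is maintained at all.
import Mathlib
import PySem

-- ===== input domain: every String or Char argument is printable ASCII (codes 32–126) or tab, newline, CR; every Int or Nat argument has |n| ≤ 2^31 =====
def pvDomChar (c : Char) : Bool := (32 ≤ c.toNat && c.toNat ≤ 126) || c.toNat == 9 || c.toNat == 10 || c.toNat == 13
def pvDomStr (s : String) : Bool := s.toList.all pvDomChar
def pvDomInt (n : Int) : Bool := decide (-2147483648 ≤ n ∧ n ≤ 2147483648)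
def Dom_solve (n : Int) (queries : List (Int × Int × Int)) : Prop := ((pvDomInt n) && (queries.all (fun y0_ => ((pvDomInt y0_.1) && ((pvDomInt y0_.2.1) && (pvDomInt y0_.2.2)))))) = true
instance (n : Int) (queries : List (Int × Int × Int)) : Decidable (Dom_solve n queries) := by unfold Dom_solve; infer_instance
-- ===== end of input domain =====

-- B is a stateless offline reformulation: it maintains no adjacency structure, and for
-- each t=3 query rescans the query pfx backwards, answering from the most recent
-- add/remove event on each of the two directed pairs (alternative, not faster).

-- ===== PORT A =====
-- one loop iteration of A: state = (graph, ans)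
def solveStepA (st : PySem.Dict Int (PySem.Set Int) × List String)
    (q : Int × Int × Int) : PySem.Dict Int (PySem.Set Int) × List String :=
  let graph := st.1
  let ans := st.2
  let t := q.1
  let a := q.2.1
  let b := q.2.2
  if t = 1 then
    match graph.get? a with
    | none => (graph.insert a (PySem.Set.ofList [b]), ans)        -- graph[a] = {b}
    | some s => (graph.insert a (PySem.Set.add s b), ans)         -- graph[a].add(b)
  else if t = 2 then
    match graph.get? a with
    | none => (graph, ans)
    | some s => (graph.insert a (PySem.Set.discard s b), ans)     -- graph[a].discard(b)
  else if t = 3 then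
    if !graph.contains a || !graph.contains b then
      (graph, ans ++ ["No"])
    else
      if PySem.Set.contains (graph.getD a PySem.Set.empty) b
          && PySem.Set.contains (graph.getD b PySem.Set.empty) a then
        (graph, ans ++ ["Yes"])
      else
        (graph, ans ++ ["No"])
  else st

def solve (n : Int) (queries : List (Int × Int × Int)) : List String :=
  (queries.foldl solveStepA (PySem.Dict.empty, [])).2

-- ===== PORT B =====
-- _present's loop over reversed(pfx): first add/remove event touching (a,b) decides
def presentRev : List (Int × Int × Int) → Int → Int → Bool
  | [], _, _ => false
  | (t, x, y) :: rest, a, b =>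
    if x = a ∧ y = b ∧ (t = 1 ∨ t = 2) then decide (t = 1) else presentRev rest a b

def present (pfx : List (Int × Int × Int)) (a b : Int) : Bool :=
  presentRev pfx.reverse a b

-- one iteration of B's loop over enumerate(queries)
def solveStepB (queries : List (Int × Int × Int)) (ans : List String)
    (iq : Int × Int × Int × Int) : List String :=
  let i := iq.1
  let t := iq.2.1
  let a := iq.2.2.1
  let b := iq.2.2.2
  if t = 3 then
    let pre := PySem.List.slice queries none (some i)             -- queries[:i]
    if present pre a b && present pre b a then ans ++ ["Yes"] else ans ++ ["No"]
  else ans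

def solve_alt (n : Int) (queries : List (Int × Int × Int)) : List String :=
  (PySem.List.enumerate queries 0).foldl (solveStepB queries) []

-- ===== PRECONDITION & SPEC =====
def Spec_solve (n : Int) (queries : List (Int × Int × Int)) (out : List String) : Prop := out = solve_alt n queries
instance (n : Int) (queries : List (Int × Int × Int)) (out : List String) : Decidable (Spec_solve n queries out) := by unfold Spec_solve; infer_instance

-- ===== CLAIM (what is proved, stated in full; the proofs are below) =====
def Claim_equal_solve : Prop := ∀ (n : Int) (queries : List (Int × Int × Int)), Dom_solve n queries → Spec_solve n queries (solve n queries)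

-- ===== LEMMAS AND PROOFS =====

-- B's answers for the suffix qs, when qs starts at position i of queries
def bAns (queries : List (Int × Int × Int)) : Int → List (Int × Int × Int) → List String
  | _, [] => []
  | i, (t, a, b) :: rest =>
    (if t = 3 then
      [if present (PySem.List.slice queries none (some i)) a b
          && present (PySem.List.slice queries none (some i)) b a then "Yes" else "No"]
     else []) ++ bAns queries (i + 1) rest

lemma foldl_stepB_eq_bAns (queries qs : List (Int × Int × Int)) :
    ∀ (i : Int) (ans : List String),
    (PySem.List.enumerate qs i).foldl (solveStepB queries) ans = ans ++ bAns queries i qs := by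
  induction qs with
  | nil => intro i ans; simp [PySem.List.enumerate_nil, bAns]
  | cons q rest ih =>
    intro i ans
    obtain ⟨t, a, b⟩ := q
    rw [PySem.List.enumerate_cons, List.foldl_cons, ih]
    simp only [bAns, solveStepB]
    split_ifs <;> simp_all

-- the most-recent-event rule after one more query
lemma present_append (pre : List (Int × Int × Int)) (t x y a b : Int) :
    present (pre ++ [(t, x, y)]) a b
      = if x = a ∧ y = b ∧ (t = 1 ∨ t = 2) then decide (t = 1) else present pre a b := by
  simp [present, List.reverse_append, presentRev]

-- coupling invariant between A's dict-of-sets and B's pfx-scan predicate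
def EdgeInv (graph : PySem.Dict Int (PySem.Set Int)) (pre : List (Int × Int × Int)) : Prop :=
  ∀ a b : Int, (∃ s, graph.get? a = some s ∧ b ∈ s) ↔ present pre a b = true

lemma get_some_inj {d : PySem.Dict Int (PySem.Set Int)} {k : Int} {s s' : PySem.Set Int}
    (h1 : d.get? k = some s) (h2 : d.get? k = some s') : s = s' := by
  rw [h1] at h2; injection h2

lemma foldl_A_eq_bAns (queries : List (Int × Int × Int)) :
    ∀ (qs done : List (Int × Int × Int)) (graph : PySem.Dict Int (PySem.Set Int))
      (ans : List String),
    queries = done ++ qs → EdgeInv graph done →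
    (qs.foldl solveStepA (graph, ans)).2 = ans ++ bAns queries (done.length : Int) qs := by
  intro qs
  induction qs with
  | nil => intro done graph ans _ _; simp [bAns]
  | cons q rest ih =>
    intro done graph ans hq hinv
    obtain ⟨t, a, b⟩ := q
    have hslice : PySem.List.slice queries none (some ((done.length : Nat) : Int)) = done := by
      rw [PySem.List.slice_to_natCast, hq, List.take_left]
    have hq' : queries = (done ++ [(t, a, b)]) ++ rest := by simp [hq]
    have hlen : ((done ++ [(t, a, b)]).length : Int) = (done.length : Int) + 1 := by simp
    simp only [List.foldl_cons, bAns, hslice]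
    by_cases ht1 : t = 1
    · subst ht1
      have hnext : ∀ x y : Int,
          present (done ++ [(1, a, b)]) x y = if a = x ∧ b = y then true else present done x y := by
        intro x y
        rw [present_append]
        by_cases hxy : a = x ∧ b = y
        · simp [hxy]
        · simp only [hxy, if_false]
          rw [if_neg]
          rintro ⟨hx, hy, _⟩
          exact hxy ⟨hx, hy⟩
      rcases hsa : graph.get? a with _ | s
      · simp only [solveStepA, hsa, Int.reduceEq, reduceIte]
        rw [ih (done ++ [(1, a, b)]) _ ans hq' ?_, hlen]
        · simp
        · intro x y
          rw [hnext x y, PySem.Dict.get?_insert]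
          by_cases hx : x = a
          · subst hx
            rw [if_pos rfl]
            constructor
            · rintro ⟨s', hs', hy⟩
              injection hs' with h
              subst h
              rw [PySem.Set.mem_ofList, List.mem_singleton] at hy
              simp [hy]
            · intro h
              refine ⟨_, rfl, ?_⟩
              by_cases hby : b = y
              · rw [hby]; exact (PySem.Set.mem_ofList _ _).mpr (List.mem_singleton.mpr rfl)
              · exfalso
                rw [if_neg (fun hc => hby hc.2)] at h
                have := (hinv x y).mpr h
                obtain ⟨s', hs', _⟩ := this
                rw [hsa] at hs'; cases hs'
          · rw [if_neg hx, if_neg (fun hc => hx hc.1.symm)]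
            exact hinv x y
      · simp only [solveStepA, hsa, Int.reduceEq, reduceIte]
        rw [ih (done ++ [(1, a, b)]) _ ans hq' ?_, hlen]
        · simp
        · intro x y
          rw [hnext x y, PySem.Dict.get?_insert]
          by_cases hx : x = a
          · subst hx
            rw [if_pos rfl]
            constructor
            · rintro ⟨s', hs', hy⟩
              injection hs' with h
              subst h
              rcases (PySem.Set.mem_add s b y).mp hy with h | h
              · by_cases hby : b = y
                · simp [hby]
                · rw [if_neg (fun hc => hby hc.2)]
                  exact (hinv x y).mp ⟨s, hsa, h⟩
              · simp [h]
            · intro h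
              refine ⟨_, rfl, ?_⟩
              by_cases hby : b = y
              · exact (PySem.Set.mem_add s b y).mpr (Or.inr hby.symm)
              · rw [if_neg (fun hc => hby hc.2)] at h
                obtain ⟨s', hs', hy⟩ := (hinv x y).mpr h
                cases get_some_inj hsa hs'
                exact (PySem.Set.mem_add s b y).mpr (Or.inl hy)
          · rw [if_neg hx, if_neg (fun hc => hx hc.1.symm)]
            exact hinv x y
    · by_cases ht2 : t = 2
      · subst ht2
        have hnext : ∀ x y : Int,
            present (done ++ [(2, a, b)]) x y
              = if a = x ∧ b = y then false else present done x y := by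
          intro x y
          rw [present_append]
          by_cases hxy : a = x ∧ b = y
          · simp [hxy]
          · simp only [hxy, if_false]
            rw [if_neg]
            rintro ⟨hx, hy, _⟩
            exact hxy ⟨hx, hy⟩
        rcases hsa : graph.get? a with _ | s
        · simp only [solveStepA, hsa, Int.reduceEq, reduceIte]
          rw [ih (done ++ [(2, a, b)]) _ ans hq' ?_, hlen]
          · simp
          · intro x y
            rw [hnext x y]
            by_cases hxy : a = x ∧ b = y
            · rw [if_pos hxy]
              constructor
              · rintro ⟨s', hs', _⟩
                rw [hxy.1] at hsa
                rw [hsa] at hs'; cases hs'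
              · intro h; cases h
            · rw [if_neg hxy]; exact hinv x y
        · simp only [solveStepA, hsa, Int.reduceEq, reduceIte]
          rw [ih (done ++ [(2, a, b)]) _ ans hq' ?_, hlen]
          · simp
          · intro x y
            rw [hnext x y, PySem.Dict.get?_insert]
            by_cases hx : x = a
            · subst hx
              rw [if_pos rfl]
              constructor
              · rintro ⟨s', hs', hy⟩
                injection hs' with h
                subst h
                obtain ⟨hy, hne⟩ := (PySem.Set.mem_discard s b y).mp hy
                rw [if_neg (fun hc => hne hc.2.symm)]
                exact (hinv x y).mp ⟨s, hsa, hy⟩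
              · intro h
                by_cases hby : b = y
                · rw [if_pos ⟨rfl, hby⟩] at h; cases h
                · rw [if_neg (fun hc => hby hc.2)] at h
                  obtain ⟨s', hs', hy⟩ := (hinv x y).mpr h
                  cases get_some_inj hsa hs'
                  exact ⟨_, rfl, (PySem.Set.mem_discard s b y).mpr ⟨hy, fun hc => hby hc.symm⟩⟩
            · rw [if_neg hx, if_neg (fun hc => hx hc.1.symm)]
              exact hinv x y
      · by_cases ht3 : t = 3
        · subst ht3
          have hnext : ∀ x y : Int, present (done ++ [(3, a, b)]) x y = present done x y := by
            intro x y
            rw [present_append, if_neg]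
            rintro ⟨_, _, h | h⟩ <;> cases h
          have hout :
              (if !graph.contains a || !graph.contains b then ["No"]
               else if PySem.Set.contains (graph.getD a PySem.Set.empty) b
                       && PySem.Set.contains (graph.getD b PySem.Set.empty) a
                    then ["Yes"] else ["No"])
              = [if present done a b && present done b a then "Yes" else "No"] := by
            rcases hsa : graph.get? a with _ | sa
            · have hA : present done a b = false := by
                rw [Bool.eq_false_iff]
                intro h
                obtain ⟨s, hs, _⟩ := (hinv a b).mpr h
                rw [hsa] at hs; cases hs
              simp [PySem.Dict.contains_eq_isSome_get?, hsa, hA]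
            · rcases hsb : graph.get? b with _ | sb
              · have hB : present done b a = false := by
                  rw [Bool.eq_false_iff]
                  intro h
                  obtain ⟨s, hs, _⟩ := (hinv b a).mpr h
                  rw [hsb] at hs; cases hs
                simp [PySem.Dict.contains_eq_isSome_get?, hsb, hB]
              · have hA : sa.contains b = present done a b := by
                  rcases hc : present done a b with _ | _
                  · rw [Bool.eq_false_iff]
                    intro h
                    have := (hinv a b).mp ⟨sa, hsa, (PySem.Set.contains_iff sa b).mp h⟩
                    rw [hc] at this; cases this
                  · obtain ⟨s, hs, hb⟩ := (hinv a b).mpr hc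
                    cases get_some_inj hsa hs
                    exact (PySem.Set.contains_iff sa b).mpr hb
                have hB : sb.contains a = present done b a := by
                  rcases hc : present done b a with _ | _
                  · rw [Bool.eq_false_iff]
                    intro h
                    have := (hinv b a).mp ⟨sb, hsb, (PySem.Set.contains_iff sb a).mp h⟩
                    rw [hc] at this; cases this
                  · obtain ⟨s, hs, hb⟩ := (hinv b a).mpr hc
                    cases get_some_inj hsb hs
                    exact (PySem.Set.contains_iff sb a).mpr hb
                rw [PySem.Dict.getD_of_get?_eq_some _ _ hsa,
                  PySem.Dict.getD_of_get?_eq_some _ _ hsb, hA, hB]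
                simp only [PySem.Dict.contains_eq_isSome_get?, hsa, hsb, Option.isSome_some,
                  Bool.not_true, Bool.or_self, Bool.and_eq_true]
                split_ifs <;> simp_all
          simp only [solveStepA, Int.reduceEq, reduceIte]
          rw [show (if !graph.contains a || !graph.contains b then (graph, ans ++ ["No"])
              else if PySem.Set.contains (graph.getD a PySem.Set.empty) b
                      && PySem.Set.contains (graph.getD b PySem.Set.empty) a
                   then (graph, ans ++ ["Yes"]) else (graph, ans ++ ["No"]))
            = (graph, ans ++ (if !graph.contains a || !graph.contains b then ["No"]
              else if PySem.Set.contains (graph.getD a PySem.Set.empty) b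
                      && PySem.Set.contains (graph.getD b PySem.Set.empty) a
                   then ["Yes"] else ["No"]))
            from by split_ifs <;> rfl, hout]
          rw [ih (done ++ [(3, a, b)]) graph _ hq' ?_, hlen]
          · simp
          · intro x y
            rw [hnext x y]
            exact hinv x y
        · rw [show solveStepA (graph, ans) (t, a, b) = (graph, ans) from by
            simp [solveStepA, ht1, ht2, ht3]]
          rw [ih (done ++ [(t, a, b)]) graph ans hq' ?_, hlen]
          · simp [ht3]
          · intro x y
            rw [present_append, if_neg]
            · exact hinv x y
            · rintro ⟨_, _, h | h⟩
              · exact ht1 h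
              · exact ht2 h

-- ===== VERDICT (by name: the statement is the Claim_ definition above) =====
theorem solve_spec : Claim_equal_solve := by
  intro n queries _
  unfold Spec_solve solve solve_alt
  rw [foldl_stepB_eq_bAns queries queries 0 []]
  have h0 : (0 : Int) = (((([] : List (Int × Int × Int)).length : Nat)) : Int) := by simp
  rw [h0]
  exact foldl_A_eq_bAns queries queries [] PySem.Dict.empty []
    (by simp) (by intro a b; simp [present, presentRev, PySem.Dict.get?_empty])
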